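-- pv_equiv track=rewrite | github.com/999GanMaoLingKeLi/VSCode-sync-demo | 毕业设计/第二章/Untitled-1.py | max_rectangle_after_swap
-- ===== SOURCE A (Python) =====
-- def max_rectangle_after_swap(heights):
--     n = len(heights)
--     # Compute nearest smaller to left and right
--     stack = []  # stores indices
--     left = [-1] * n
--     right = [n] * n
--     for i in range(n):
--         while stack and heights[stack[-1]] >= heights[i]:
--             stack.pop()
--         left[i] = stack[-1] if stack else -1
--         stack.append(i)
--     stack.clear()
--     for i in range(n-1, -1, -1):
--         while stack and heights[stack[-1]] >= heights[i]:
--             stack.pop()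
--         right[i] = stack[-1] if stack else n
--         stack.append(i)
--     # Find baseline max rectangle
--     max_area = 0
--     best_i = -1
--     for i in range(n):
--         area = heights[i] * (right[i] - left[i] - 1)
--         if area > max_area:
--             max_area = area
--             best_i = i
--     # Region boundaries
--     L = left[best_i] + 1
--     R = right[best_i] - 1
--     # Find two smallest heights in region
--     h1 = heights[best_i]
--     # Initialize second smallest
--     h2 = float('inf')
--     for i in range(L, R+1):
--         h = heights[i]
--         if i == best_i:
--             continue
--         if h < h2:
--             h2 = h
--     # If region has only one bar, cannot improve height
--     if h2 == float('inf'):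
--         h2 = 0
--     # Find max height outside region
--     H_out = 0
--     for i in range(0, L):
--         if heights[i] > H_out:
--             H_out = heights[i]
--     for i in range(R+1, n):
--         if heights[i] > H_out:
--             H_out = heights[i]
--     # Compute improved area
--     improved_area = 0
--     if H_out > h1:
--         new_min = min(h2, H_out)
--         improved_area = new_min * (R - L + 1)
--     return max(max_area, improved_area)
-- ===== SOURCE B (Python) =====
-- def max_rectangle_after_swap(heights):
--     n = len(heights)
--
--     def nearest_left(i):
--         # nearest j < i with heights[j] < heights[i], else -1
--         j = i - 1
--         while j >= 0 and heights[j] >= heights[i]: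
--             j -= 1
--         return j
--
--     def nearest_right(i):
--         # nearest j > i with heights[j] < heights[i], else n
--         j = i + 1
--         while j < n and heights[j] >= heights[i]:
--             j += 1
--         return j
--
--     # baseline: one pass, widths computed by direct outward scans
--     max_area = 0
--     best_i = -1
--     for i in range(n):
--         area = heights[i] * (nearest_right(i) - nearest_left(i) - 1)
--         if area > max_area:
--             max_area = area
--             best_i = i
--
--     if best_i == -1:
--         # no bar of positive height: no rectangle beats the empty one
--         return 0
--
--     L = nearest_left(best_i) + 1
--     R = nearest_right(best_i) - 1
--     h1 = heights[best_i]
--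
--     # one combined pass: second-smallest inside the region, max outside it
--     h2 = None
--     H_out = 0
--     for i in range(n):
--         h = heights[i]
--         if L <= i <= R:
--             if i != best_i and (h2 is None or h < h2):
--                 h2 = h
--         elif h > H_out:
--             H_out = h
--
--     if h2 is None:
--         h2 = 0
--
--     improved_area = 0
--     if H_out > h1:
--         improved_area = min(h2, H_out) * (R - L + 1)
--     return max(max_area, improved_area)
-- ===== Notes on version B (the rewrite author's own statement) =====
-- stated objective: simpler
-- what changed: B replaces A's two monotonic-stack passes by direct outward scans from each index (no stack and no left/right arrays), merges A's three separate h2/H_out region loops into one combined pass over the bars, and returns 0 directly when no bar has positive height.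
import Mathlib
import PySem

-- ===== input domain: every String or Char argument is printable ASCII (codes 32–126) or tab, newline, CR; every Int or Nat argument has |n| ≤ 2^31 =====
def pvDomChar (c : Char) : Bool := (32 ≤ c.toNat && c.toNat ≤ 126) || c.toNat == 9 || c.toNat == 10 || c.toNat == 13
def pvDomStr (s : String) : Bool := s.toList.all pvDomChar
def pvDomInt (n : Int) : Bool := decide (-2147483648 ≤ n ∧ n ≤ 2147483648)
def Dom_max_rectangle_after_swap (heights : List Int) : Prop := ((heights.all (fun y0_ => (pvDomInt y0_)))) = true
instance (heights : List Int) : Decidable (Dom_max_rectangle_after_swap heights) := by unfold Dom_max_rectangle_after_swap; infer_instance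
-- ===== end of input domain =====

-- B replaces A's two monotonic-stack passes by direct outward scans per index (no stack, no
-- left/right arrays), merges the three baseline/h2/H_out loops into one baseline loop plus one
-- combined scan, and returns 0 directly when no bar has positive height (objective: simpler).

-- ===== PORT A =====
-- the Python stack is kept top-first here (Python's stack[-1] is the head); contents are the same indices
def pvPopA (h : List Int) (x : Int) : List Nat → List Nat
  | [] => []
  | j :: s => if x ≤ h.getD j 0 then pvPopA h x s else j :: s

def pvTopA (d : Int) : List Nat → Int
  | [] => d
  | j :: _ => (j : Int)

-- first pass: left[i] is assigned for i = 0,1,…, so the left array is built by appending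
def pvPass1 (h : List Int) (is : List Nat) (stack : List Nat) (left : List Int) : List Nat × List Int :=
  match is with
  | [] => (stack, left)
  | i :: is' =>
    let s := pvPopA h (h.getD i 0) stack
    pvPass1 h is' (i :: s) (left ++ [pvTopA (-1) s])

-- second pass: right[i] is assigned for i = n-1,…,0, so the right array is built by prepending
def pvPass2 (h : List Int) (n : Nat) (is : List Nat) (stack : List Nat) (right : List Int) : List Nat × List Int :=
  match is with
  | [] => (stack, right)
  | i :: is' =>
    let s := pvPopA h (h.getD i 0) stack
    pvPass2 h n is' (i :: s) (pvTopA (n : Int) s :: right)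

def pvBaseA (h left right : List Int) (is : List Nat) (st : Int × Int) : Int × Int :=
  match is with
  | [] => st
  | i :: is' =>
    let area := h.getD i 0 * (right.getD i 0 - left.getD i 0 - 1)
    pvBaseA h left right is' (if st.1 < area then (area, (i : Int)) else st)

-- h2's float('inf') sentinel is modelled by Option Int (none = inf, replaced by 0 at the end)
def pvH2A (h : List Int) (bi : Int) (is : List Int) (acc : Option Int) : Option Int :=
  match is with
  | [] => acc
  | i :: is' =>
    if i = bi then pvH2A h bi is' acc
    else
      let v := (PySem.List.pyGet? h i).getD 0
      pvH2A h bi is' (match acc with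
        | none => some v
        | some c => if v < c then some v else some c)

def pvHoutA (h : List Int) (is : List Int) (acc : Int) : Int :=
  match is with
  | [] => acc
  | i :: is' =>
    let v := (PySem.List.pyGet? h i).getD 0
    pvHoutA h is' (if acc < v then v else acc)

def max_rectangle_after_swap (heights : List Int) : Int :=
  let n := heights.length
  let left := (pvPass1 heights (List.range n) [] []).2
  let right := (pvPass2 heights n ((List.range n).reverse) [] []).2
  let mb := pvBaseA heights left right (List.range n) (0, -1)
  let max_area := mb.1
  let best_i := mb.2
  -- left[best_i] / right[best_i] / heights[best_i]: best_i may be -1 (Python wraparound); in range within Pre_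
  let L := (PySem.List.pyGet? left best_i).getD 0 + 1
  let R := (PySem.List.pyGet? right best_i).getD 0 - 1
  let h1 := (PySem.List.pyGet? heights best_i).getD 0
  let h2 := (pvH2A heights best_i (PySem.List.pyRange L (R + 1) 1) none).getD 0
  let H_out := pvHoutA heights (PySem.List.pyRange (R + 1) (n : Int) 1) (pvHoutA heights (PySem.List.pyRange 0 L 1) 0)
  let improved := if h1 < H_out then (min h2 H_out) * (R - L + 1) else 0
  max max_area improved

-- ===== PORT B =====
-- nearest j < i with heights[j] < x, else -1, by scanning j = i-1, i-2, …
def pvFindL (h : List Int) (x : Int) : Nat → Int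
  | 0 => -1
  | j + 1 => if x ≤ h.getD j 0 then pvFindL h x j else (j : Int)

-- nearest j' ≥ j with heights[j'] < x, else n, by scanning upward
def pvFindR (h : List Int) (x : Int) (n : Nat) (j : Nat) : Int :=
  if j < n then (if x ≤ h.getD j 0 then pvFindR h x n (j + 1) else (j : Int)) else (n : Int)
termination_by n - j

def pvBaseB (h : List Int) (n : Nat) (is : List Nat) (st : Int × Int) : Int × Int :=
  match is with
  | [] => st
  | i :: is' =>
    let area := h.getD i 0 * (pvFindR h (h.getD i 0) n (i + 1) - pvFindL h (h.getD i 0) i - 1)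
    pvBaseB h n is' (if st.1 < area then (area, (i : Int)) else st)

-- one combined pass: (second-smallest inside [L,R] as Option, max outside)
def pvScanB (h : List Int) (L R : Int) (bi : Nat) (is : List Nat) (st : Option Int × Int) : Option Int × Int :=
  match is with
  | [] => st
  | i :: is' =>
    let v := h.getD i 0
    let st' :=
      if L ≤ (i : Int) ∧ (i : Int) ≤ R then
        (if i ≠ bi ∧ (∀ c ∈ st.1, v < c) then (some v, st.2) else st)
      else (if st.2 < v then (st.1, v) else st)
    pvScanB h L R bi is' st'

def max_rectangle_after_swap_alt (heights : List Int) : Int :=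
  let n := heights.length
  let mb := pvBaseB heights n (List.range n) (0, -1)
  let max_area := mb.1
  let best_i := mb.2
  if best_i = -1 then 0
  else
    let bi := best_i.toNat
    let x := heights.getD bi 0
    let L := pvFindL heights x bi + 1
    let R := pvFindR heights x n (bi + 1) - 1
    let s := pvScanB heights L R bi (List.range n) (none, 0)
    let h2 := s.1.getD 0
    let H_out := s.2
    let improved := if x < H_out then (min h2 H_out) * (R - L + 1) else 0
    max max_area improved

-- ===== PRECONDITION & SPEC =====
-- Pre_ excludes only the empty list, on which A raises IndexError (left[best_i] with best_i = -1 on an empty array)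
def Pre_max_rectangle_after_swap (heights : List Int) : Prop := heights ≠ []
instance (heights : List Int) : Decidable (Pre_max_rectangle_after_swap heights) := by unfold Pre_max_rectangle_after_swap; infer_instance
def pvWitness_max_rectangle_after_swap : List Int := [2, 1, 2]

def Spec_max_rectangle_after_swap (heights : List Int) (out : Int) : Prop := out = max_rectangle_after_swap_alt heights
instance (heights : List Int) (out : Int) : Decidable (Spec_max_rectangle_after_swap heights out) := by unfold Spec_max_rectangle_after_swap; infer_instance

-- ===== CLAIM (what is proved, stated in full; the proofs are below) =====
def Claim_equal_max_rectangle_after_swap : Prop := ∀ (heights : List Int), Dom_max_rectangle_after_swap heights → Pre_max_rectangle_after_swap heights → Spec_max_rectangle_after_swap heights (max_rectangle_after_swap heights)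


-- ===== LEMMAS AND PROOFS =====

-- stack state of A's first pass before processing index i
def pvSL (h : List Int) : Nat → List Nat
  | 0 => []
  | i + 1 => i :: pvPopA h (h.getD i 0) (pvSL h i)

-- stack state of A's second pass after processing indices n-1, …, m
def pvSR (h : List Int) (n m : Nat) : List Nat :=
  if m < n then m :: pvPopA h (h.getD m 0) (pvSR h n (m + 1)) else []
termination_by n - m

theorem pvSR_eq (h : List Int) (n m : Nat) (hmn : m < n) :
    pvSR h n m = m :: pvPopA h (h.getD m 0) (pvSR h n (m + 1)) := by
  conv_lhs => rw [pvSR]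
  rw [if_pos hmn]

theorem pvSR_nil (h : List Int) (n m : Nat) (hmn : ¬ m < n) : pvSR h n m = [] := by
  conv_lhs => rw [pvSR]
  rw [if_neg hmn]

def pvLInv (h : List Int) (i : Nat) (s : List Nat) : Prop :=
  (∀ j ∈ s, j < i ∧ ∀ k, j < k → k < i → h.getD j 0 < h.getD k 0) ∧
  (∀ j, j < i → (∀ k, j < k → k < i → h.getD j 0 < h.getD k 0) → j ∈ s) ∧
  s.Pairwise (fun a b => b < a)

def pvRInv (h : List Int) (n m : Nat) (s : List Nat) : Prop :=
  (∀ j ∈ s, m ≤ j ∧ j < n ∧ ∀ k, m ≤ k → k < j → h.getD j 0 < h.getD k 0) ∧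
  (∀ j, m ≤ j → j < n → (∀ k, m ≤ k → k < j → h.getD j 0 < h.getD k 0) → j ∈ s) ∧
  s.Pairwise (fun a b => a < b)

theorem pvPop_eq_filter (h : List Int) (x : Int) (s : List Nat)
    (hp : s.Pairwise (fun a b => h.getD b 0 < h.getD a 0)) :
    pvPopA h x s = s.filter (fun j => decide (h.getD j 0 < x)) := by
  induction s with
  | nil => rfl
  | cons j s ih =>
    rcases List.pairwise_cons.mp hp with ⟨hj, hs⟩
    by_cases hx : x ≤ h.getD j 0
    · rw [show pvPopA h x (j :: s) = pvPopA h x s by simp only [pvPopA]; rw [if_pos hx],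
          List.filter_cons_of_neg (by simp only [decide_eq_true_eq]; omega), ih hs]
    · rw [show pvPopA h x (j :: s) = j :: s by simp only [pvPopA]; rw [if_neg hx],
          List.filter_cons_of_pos (by simp only [decide_eq_true_eq]; omega)]
      exact congrArg _ (List.filter_eq_self.mpr (fun b hb => by
        simp only [decide_eq_true_eq]; exact lt_trans (hj b hb) (by omega))).symm

theorem pvLInv_hpair (h : List Int) (i : Nat) (s : List Nat) (hv : pvLInv h i s) :
    s.Pairwise (fun a b => h.getD b 0 < h.getD a 0) := by
  refine hv.2.2.imp_of_mem ?_
  intro a b ha hb hab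
  exact (hv.1 b hb).2 a hab (hv.1 a ha).1

theorem pvRInv_hpair (h : List Int) (n m : Nat) (s : List Nat) (hv : pvRInv h n m s) :
    s.Pairwise (fun a b => h.getD b 0 < h.getD a 0) := by
  refine hv.2.2.imp_of_mem ?_
  intro a b ha hb hab
  exact (hv.1 b hb).2.2 a (hv.1 a ha).1 hab

theorem pvTop_desc (d : Int) (s : List Nat) (m : Nat) (hp : s.Pairwise (fun a b => b < a))
    (hm : m ∈ s) (hmax : ∀ j ∈ s, j ≤ m) : pvTopA d s = (m : Int) := by
  cases s with
  | nil => cases hm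
  | cons j s =>
    have hjm : j = m := by
      rcases List.mem_cons.mp hm with rfl | hm'
      · rfl
      · have h1 := (List.pairwise_cons.mp hp).1 m hm'
        have h2 := hmax j (List.mem_cons_self ..)
        omega
    simp [pvTopA, hjm]

theorem pvTop_asc (d : Int) (s : List Nat) (m : Nat) (hp : s.Pairwise (fun a b => a < b))
    (hm : m ∈ s) (hmin : ∀ j ∈ s, m ≤ j) : pvTopA d s = (m : Int) := by
  cases s with
  | nil => cases hm
  | cons j s =>
    have hjm : j = m := by
      rcases List.mem_cons.mp hm with rfl | hm'
      · rfl
      · have h1 := (List.pairwise_cons.mp hp).1 m hm'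
        have h2 := hmin j (List.mem_cons_self ..)
        omega
    simp [pvTopA, hjm]

theorem pvFindL_spec (h : List Int) (x : Int) (i : Nat) :
    ((∀ j, j < i → x ≤ h.getD j 0) ∧ pvFindL h x i = -1) ∨
    (∃ m, m < i ∧ h.getD m 0 < x ∧ (∀ k, m < k → k < i → x ≤ h.getD k 0) ∧ pvFindL h x i = (m : Int)) := by
  induction i with
  | zero => exact Or.inl ⟨by omega, rfl⟩
  | succ j ih =>
    by_cases hx : x ≤ h.getD j 0
    · rcases ih with ⟨hall, he⟩ | ⟨m, hm1, hm2, hm3, he⟩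
      · refine Or.inl ⟨fun k hk => ?_, by simp only [pvFindL]; rw [if_pos hx]; exact he⟩
        rcases Nat.lt_succ_iff_lt_or_eq.mp hk with hk | rfl
        exacts [hall k hk, hx]
      · refine Or.inr ⟨m, by omega, hm2, fun k h1 h2 => ?_, by simp only [pvFindL]; rw [if_pos hx]; exact he⟩
        rcases Nat.lt_succ_iff_lt_or_eq.mp h2 with h2 | rfl
        exacts [hm3 k h1 h2, hx]
    · exact Or.inr ⟨j, by omega, by omega, by omega, by simp only [pvFindL]; rw [if_neg hx]⟩

theorem pvFindR_spec (h : List Int) (x : Int) (n : Nat) (j : Nat) :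
    ((∀ k, j ≤ k → k < n → x ≤ h.getD k 0) ∧ pvFindR h x n j = (n : Int)) ∨
    (∃ m, j ≤ m ∧ m < n ∧ h.getD m 0 < x ∧ (∀ k, j ≤ k → k < m → x ≤ h.getD k 0) ∧ pvFindR h x n j = (m : Int)) := by
  have key : ∀ fuel j, n - j ≤ fuel →
      ((∀ k, j ≤ k → k < n → x ≤ h.getD k 0) ∧ pvFindR h x n j = (n : Int)) ∨
      (∃ m, j ≤ m ∧ m < n ∧ h.getD m 0 < x ∧ (∀ k, j ≤ k → k < m → x ≤ h.getD k 0) ∧ pvFindR h x n j = (m : Int)) := by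
    intro fuel
    induction fuel with
    | zero =>
      intro j hj
      have hjn : ¬ j < n := by omega
      exact Or.inl ⟨fun k h1 h2 => by omega, by rw [pvFindR, if_neg hjn]⟩
    | succ fuel ih =>
      intro j hj
      by_cases hjn : j < n
      · by_cases hx : x ≤ h.getD j 0
        · rcases ih (j + 1) (by omega) with ⟨hall, he⟩ | ⟨m, hm1, hm2, hm3, hm4, he⟩
          · refine Or.inl ⟨fun k h1 h2 => ?_, by rw [pvFindR, if_pos hjn, if_pos hx]; exact he⟩
            rcases Nat.eq_or_lt_of_le h1 with rfl | h1
            exacts [hx, hall k (by omega) h2]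
          · refine Or.inr ⟨m, by omega, hm2, hm3, fun k h1 h2 => ?_, by rw [pvFindR, if_pos hjn, if_pos hx]; exact he⟩
            rcases Nat.eq_or_lt_of_le h1 with rfl | h1
            exacts [hx, hm4 k (by omega) h2]
        · exact Or.inr ⟨j, le_refl j, hjn, by omega, by omega, by rw [pvFindR, if_pos hjn, if_neg hx]⟩
      · exact Or.inl ⟨fun k h1 h2 => by omega, by rw [pvFindR, if_neg hjn]⟩
  exact key (n - j) j (le_refl _)

theorem pvFindL_ge (h : List Int) (x : Int) (i : Nat) : -1 ≤ pvFindL h x i := by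
  rcases pvFindL_spec h x i with ⟨_, he⟩ | ⟨m, _, _, _, he⟩ <;> rw [he] <;> omega

theorem pvFindL_le (h : List Int) (x : Int) (i : Nat) : pvFindL h x i ≤ (i : Int) - 1 := by
  rcases pvFindL_spec h x i with ⟨_, he⟩ | ⟨m, hm, _, _, he⟩ <;> rw [he] <;> omega

theorem pvFindR_ge (h : List Int) (x : Int) (n : Nat) (j : Nat) (hj : j ≤ n) :
    (j : Int) ≤ pvFindR h x n j := by
  rcases pvFindR_spec h x n j with ⟨_, he⟩ | ⟨m, hm, _, _, _, he⟩ <;> rw [he] <;> omega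

theorem pvFindR_le (h : List Int) (x : Int) (n : Nat) (j : Nat) : pvFindR h x n j ≤ (n : Int) := by
  rcases pvFindR_spec h x n j with ⟨_, he⟩ | ⟨m, _, hm, _, _, he⟩ <;> rw [he] <;> omega

theorem pvSL_inv (h : List Int) : ∀ i, pvLInv h i (pvSL h i) := by
  intro i
  induction i with
  | zero => exact ⟨by simp [pvSL], by omega, by simp [pvSL]⟩
  | succ i ih =>
    have hf : pvSL h (i + 1) = i :: (pvSL h i).filter (fun j => decide (h.getD j 0 < h.getD i 0)) := by
      rw [show pvSL h (i + 1) = i :: pvPopA h (h.getD i 0) (pvSL h i) from rfl,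
          pvPop_eq_filter h _ _ (pvLInv_hpair h i _ ih)]
    rw [hf]
    refine ⟨?_, ?_, ?_⟩
    · intro j hj
      rcases List.mem_cons.mp hj with rfl | hj'
      · exact ⟨by omega, fun k hk1 hk2 => by omega⟩
      · rcases List.mem_filter.mp hj' with ⟨hmem, hlt⟩
        have hs := ih.1 j hmem
        refine ⟨by omega, fun k hk1 hk2 => ?_⟩
        rcases Nat.lt_succ_iff_lt_or_eq.mp hk2 with hk2 | rfl
        · exact hs.2 k hk1 hk2
        · exact of_decide_eq_true hlt
    · intro j hj hcond
      rcases Nat.lt_succ_iff_lt_or_eq.mp hj with hj | rfl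
      · exact List.mem_cons_of_mem _ (List.mem_filter.mpr
          ⟨ih.2.1 j hj (fun k h1 h2 => hcond k h1 (by omega)), decide_eq_true (hcond i hj (by omega))⟩)
      · exact List.mem_cons_self ..
    · refine List.pairwise_cons.mpr ⟨fun b hb => ?_, ih.2.2.filter _⟩
      exact (ih.1 b (List.mem_filter.mp hb).1).1

theorem pvSR_inv (h : List Int) (n : Nat) : ∀ m, pvRInv h n m (pvSR h n m) := by
  have key : ∀ fuel m, n - m ≤ fuel → pvRInv h n m (pvSR h n m) := by
    intro fuel
    induction fuel with
    | zero =>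
      intro m hm
      rw [pvSR_nil h n m (by omega)]
      exact ⟨by simp, fun j h1 h2 _ => by omega, by simp⟩
    | succ fuel ih =>
      intro m hm
      by_cases hmn : m < n
      · have ihm := ih (m + 1) (by omega)
        have hf : pvSR h n m = m :: (pvSR h n (m + 1)).filter (fun j => decide (h.getD j 0 < h.getD m 0)) := by
          rw [pvSR_eq h n m hmn, pvPop_eq_filter h _ _ (pvRInv_hpair h n (m + 1) _ ihm)]
        rw [hf]
        refine ⟨?_, ?_, ?_⟩
        · intro j hj
          rcases List.mem_cons.mp hj with rfl | hj'
          · exact ⟨le_refl _, hmn, fun k hk1 hk2 => by omega⟩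
          · rcases List.mem_filter.mp hj' with ⟨hmem, hlt⟩
            have hs := ihm.1 j hmem
            refine ⟨by omega, hs.2.1, fun k hk1 hk2 => ?_⟩
            rcases Nat.eq_or_lt_of_le hk1 with rfl | hk1
            · exact of_decide_eq_true hlt
            · exact hs.2.2 k hk1 hk2
        · intro j h1 h2 hcond
          rcases Nat.eq_or_lt_of_le h1 with rfl | h1
          · exact List.mem_cons_self ..
          · exact List.mem_cons_of_mem _ (List.mem_filter.mpr
              ⟨ihm.2.1 j h1 h2 (fun k hk1 hk2 => hcond k (by omega) hk2), decide_eq_true (hcond m (le_refl _) h1)⟩)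
        · refine List.pairwise_cons.mpr ⟨fun b hb => ?_, ihm.2.2.filter _⟩
          have := (ihm.1 b (List.mem_filter.mp hb).1).1
          omega
      · rw [pvSR_nil h n m hmn]
        exact ⟨by simp, fun j h1 h2 _ => by omega, by simp⟩
  exact fun m => key (n - m) m (le_refl _)

theorem pvLeftVal (h : List Int) (i : Nat) :
    pvTopA (-1) (pvPopA h (h.getD i 0) (pvSL h i)) = pvFindL h (h.getD i 0) i := by
  have hinv := pvSL_inv h i
  rw [pvPop_eq_filter h _ _ (pvLInv_hpair h i _ hinv)]
  rcases pvFindL_spec h (h.getD i 0) i with ⟨hall, he⟩ | ⟨m, hm1, hm2, hm3, he⟩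
  · rw [he]
    have hnil : (pvSL h i).filter (fun j => decide (h.getD j 0 < h.getD i 0)) = [] := by
      refine List.filter_eq_nil_iff.mpr fun j hj => ?_
      have h1 := (hinv.1 j hj).1
      have h2 := hall j h1
      simp only [decide_eq_true_eq]; omega
    rw [hnil]; rfl
  · rw [he]
    have hmem : m ∈ (pvSL h i).filter (fun j => decide (h.getD j 0 < h.getD i 0)) :=
      List.mem_filter.mpr ⟨hinv.2.1 m hm1 (fun k h1 h2 => lt_of_lt_of_le hm2 (hm3 k h1 h2)), decide_eq_true hm2⟩
    refine pvTop_desc _ _ m (hinv.2.2.filter _) hmem ?_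
    intro j hj
    rcases List.mem_filter.mp hj with ⟨hjm, hjx⟩
    have hji := (hinv.1 j hjm).1
    have hjx' := of_decide_eq_true hjx
    by_contra hgt
    have := hm3 j (by omega) hji
    omega

theorem pvRightVal (h : List Int) (n : Nat) (i : Nat) :
    pvTopA (n : Int) (pvPopA h (h.getD i 0) (pvSR h n (i + 1))) = pvFindR h (h.getD i 0) n (i + 1) := by
  have hinv := pvSR_inv h n (i + 1)
  rw [pvPop_eq_filter h _ _ (pvRInv_hpair h n (i + 1) _ hinv)]
  rcases pvFindR_spec h (h.getD i 0) n (i + 1) with ⟨hall, he⟩ | ⟨m, hm1, hm2, hm3, hm4, he⟩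
  · rw [he]
    have hnil : (pvSR h n (i + 1)).filter (fun j => decide (h.getD j 0 < h.getD i 0)) = [] := by
      refine List.filter_eq_nil_iff.mpr fun j hj => ?_
      have h1 := hinv.1 j hj
      have h2 := hall j h1.1 h1.2.1
      simp only [decide_eq_true_eq]; omega
    rw [hnil]; rfl
  · rw [he]
    have hmem : m ∈ (pvSR h n (i + 1)).filter (fun j => decide (h.getD j 0 < h.getD i 0)) :=
      List.mem_filter.mpr ⟨hinv.2.1 m hm1 hm2 (fun k h1 h2 => lt_of_lt_of_le hm3 (hm4 k h1 h2)), decide_eq_true hm3⟩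
    refine pvTop_asc _ _ m (hinv.2.2.filter _) hmem ?_
    intro j hj
    rcases List.mem_filter.mp hj with ⟨hjm, hjx⟩
    have h1 := hinv.1 j hjm
    have hjx' := of_decide_eq_true hjx
    by_contra hlt2
    have := hm4 j h1.1 (by omega)
    omega

theorem pvPass1_run (h : List Int) : ∀ (m a : Nat) (acc : List Int),
    pvPass1 h (List.range' a m) (pvSL h a) acc =
      (pvSL h (a + m), acc ++ (List.range' a m).map (fun i => pvTopA (-1) (pvPopA h (h.getD i 0) (pvSL h i)))) := by
  intro m
  induction m with
  | zero => intro a acc; simp [pvPass1]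
  | succ m ih =>
    intro a acc
    rw [List.range'_succ]
    rw [show pvPass1 h (a :: List.range' (a + 1) m) (pvSL h a) acc =
        pvPass1 h (List.range' (a + 1) m) (a :: pvPopA h (h.getD a 0) (pvSL h a))
          (acc ++ [pvTopA (-1) (pvPopA h (h.getD a 0) (pvSL h a))]) from rfl]
    rw [show (a :: pvPopA h (h.getD a 0) (pvSL h a)) = pvSL h (a + 1) from rfl]
    rw [ih (a + 1)]
    have hadd : a + 1 + m = a + (m + 1) := by omega
    rw [hadd]
    simp

theorem pvPass2_run (h : List Int) (n : Nat) : ∀ (m : Nat) (acc : List Int), m ≤ n →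
    pvPass2 h n ((List.range m).reverse) (pvSR h n m) acc =
      (pvSR h n 0, (List.range m).map (fun i => pvTopA (n : Int) (pvPopA h (h.getD i 0) (pvSR h n (i + 1)))) ++ acc) := by
  intro m
  induction m with
  | zero => intro acc _; simp [pvPass2]
  | succ m ih =>
    intro acc hm
    rw [List.range_succ, List.reverse_append]
    rw [show (([m].reverse) ++ (List.range m).reverse) = m :: (List.range m).reverse by simp]
    rw [show pvPass2 h n (m :: (List.range m).reverse) (pvSR h n (m + 1)) acc =
        pvPass2 h n ((List.range m).reverse) (m :: pvPopA h (h.getD m 0) (pvSR h n (m + 1)))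
          (pvTopA (n : Int) (pvPopA h (h.getD m 0) (pvSR h n (m + 1))) :: acc) from rfl]
    rw [show (m :: pvPopA h (h.getD m 0) (pvSR h n (m + 1))) = pvSR h n m from (pvSR_eq h n m (by omega)).symm]
    rw [ih _ (by omega)]
    simp [List.range_succ]

theorem pvLeft_eq (h : List Int) (n : Nat) :
    (pvPass1 h (List.range n) [] []).2 = (List.range n).map (fun i => pvFindL h (h.getD i 0) i) := by
  rw [List.range_eq_range']
  have hr := pvPass1_run h n 0 []
  rw [show pvSL h 0 = [] from rfl] at hr
  rw [hr]
  rw [show (0 + n) = n from by omega] at *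
  simp only [List.nil_append]
  exact List.map_congr_left fun i _ => pvLeftVal h i

theorem pvRight_eq (h : List Int) (n : Nat) :
    (pvPass2 h n ((List.range n).reverse) [] []).2 = (List.range n).map (fun i => pvFindR h (h.getD i 0) n (i + 1)) := by
  have hr := pvPass2_run h n n [] (le_refl _)
  rw [pvSR_nil h n n (by omega)] at hr
  rw [hr]
  simp only [List.append_nil]
  exact List.map_congr_left fun i _ => pvRightVal h n i

theorem pvGetD_map_range (f : Nat → Int) (n i : Nat) (hi : i < n) :
    ((List.range n).map f).getD i 0 = f i := by
  rw [List.getD_eq_getElem?_getD]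
  simp [List.getElem?_map, List.getElem?_range, hi]

theorem pvBase_eq (h : List Int) (n : Nat) : ∀ (is : List Nat) (st : Int × Int), (∀ i ∈ is, i < n) →
    pvBaseA h ((List.range n).map (fun i => pvFindL h (h.getD i 0) i))
      ((List.range n).map (fun i => pvFindR h (h.getD i 0) n (i + 1))) is st = pvBaseB h n is st := by
  intro is
  induction is with
  | nil => intro st _; rfl
  | cons i is ih =>
    intro st hb
    have hi := hb i (List.mem_cons_self ..)
    simp only [pvBaseA, pvBaseB]
    rw [pvGetD_map_range _ n i hi, pvGetD_map_range _ n i hi]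
    exact ih _ (fun j hj => hb j (List.mem_cons_of_mem _ hj))

def pvArea (h : List Int) (n : Nat) (i : Nat) : Int :=
  h.getD i 0 * (pvFindR h (h.getD i 0) n (i + 1) - pvFindL h (h.getD i 0) i - 1)

def pvStOK (h : List Int) (n : Nat) (st : Int × Int) : Prop :=
  (st = (0, -1)) ∨ (∃ iN : Nat, iN < n ∧ st.2 = (iN : Int) ∧ st.1 = pvArea h n iN ∧ 0 < st.1)

theorem pvBaseB_inv (h : List Int) (n : Nat) : ∀ (is : List Nat) (st : Int × Int),
    (∀ i ∈ is, i < n) → pvStOK h n st →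
    pvStOK h n (pvBaseB h n is st) ∧ st.1 ≤ (pvBaseB h n is st).1 ∧
      ((pvBaseB h n is st).2 = -1 → pvBaseB h n is st = st ∧ ∀ i ∈ is, pvArea h n i ≤ st.1) := by
  intro is
  induction is with
  | nil => intro st _ hok; exact ⟨hok, le_refl _, fun _ => ⟨rfl, by simp⟩⟩
  | cons i is ih =>
    intro st hb hok
    have hst1 : 0 ≤ st.1 := by
      rcases hok with rfl | ⟨iN, _, _, _, hpos⟩
      · simp
      · omega
    by_cases hlt : st.1 < pvArea h n i
    · have hok' : pvStOK h n (pvArea h n i, (i : Int)) :=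
        Or.inr ⟨i, hb i (List.mem_cons_self ..), rfl, rfl, by simp only []; omega⟩
      have hrec := ih (pvArea h n i, (i : Int)) (fun j hj => hb j (List.mem_cons_of_mem _ hj)) hok'
      have hred : pvBaseB h n (i :: is) st = pvBaseB h n is (pvArea h n i, (i : Int)) := by
        show pvBaseB h n is (if st.1 < pvArea h n i then (pvArea h n i, (i : Int)) else st) = _
        rw [if_pos hlt]
      rw [hred]
      refine ⟨hrec.1, le_trans (le_of_lt hlt) (by simpa using hrec.2.1), fun hneg => ?_⟩
      exfalso
      have heq := (hrec.2.2 hneg).1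
      rw [heq] at hneg
      simp only [] at hneg
      omega
    · have hrec := ih st (fun j hj => hb j (List.mem_cons_of_mem _ hj)) hok
      have hred : pvBaseB h n (i :: is) st = pvBaseB h n is st := by
        show pvBaseB h n is (if st.1 < pvArea h n i then (pvArea h n i, (i : Int)) else st) = _
        rw [if_neg hlt]
      rw [hred]
      refine ⟨hrec.1, hrec.2.1, fun hneg => ⟨(hrec.2.2 hneg).1, fun j hj => ?_⟩⟩
      rcases List.mem_cons.mp hj with rfl | hj'
      · omega
      · exact (hrec.2.2 hneg).2 j hj'

theorem pvHoutA_append (h : List Int) (l1 l2 : List Int) (acc : Int) :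
    pvHoutA h (l1 ++ l2) acc = pvHoutA h l2 (pvHoutA h l1 acc) := by
  induction l1 generalizing acc with
  | nil => rfl
  | cons i l1 ih => simp only [List.cons_append, pvHoutA]; exact ih _

theorem pvHoutA_nonpos (h : List Int) (hnp : ∀ v ∈ h, v ≤ 0) : ∀ (l : List Int), pvHoutA h l 0 = 0 := by
  intro l
  induction l with
  | nil => rfl
  | cons i l ih =>
    have hv : ¬ (0 < (PySem.List.pyGet? h i).getD 0) := by
      cases e : PySem.List.pyGet? h i with
      | none => simp
      | some x =>
        have hx : x ∈ h := PySem.List.mem_of_pyGet?_eq_some h e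
        have := hnp x hx
        simp only [e, Option.getD_some]
        omega
    simp only [pvHoutA]
    rw [if_neg hv]
    exact ih

theorem pvScan_split (h : List Int) (L R : Int) (bi : Nat) : ∀ (is : List Nat) (a1 : Option Int) (a2 : Int),
    pvScanB h L R bi is (a1, a2) =
      (pvH2A h (bi : Int) ((is.filter (fun i : Nat => decide (L ≤ (i : Int) ∧ (i : Int) ≤ R))).map (fun i : Nat => (i : Int))) a1,
       pvHoutA h ((is.filter (fun i : Nat => !decide (L ≤ (i : Int) ∧ (i : Int) ≤ R))).map (fun i : Nat => (i : Int))) a2) := by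
  intro is
  induction is with
  | nil => intro a1 a2; rfl
  | cons i is ih =>
    intro a1 a2
    have hval : (PySem.List.pyGet? h ((i : Nat) : Int)).getD 0 = h.getD i 0 := by
      rw [PySem.List.pyGet?_natCast, List.getD_eq_getElem?_getD]
    by_cases hreg : L ≤ (i : Int) ∧ (i : Int) ≤ R
    · rw [show pvScanB h L R bi (i :: is) (a1, a2) =
          pvScanB h L R bi is (if i ≠ bi ∧ (∀ c ∈ a1, h.getD i 0 < c) then (some (h.getD i 0), a2) else (a1, a2)) by
        simp only [pvScanB]; rw [if_pos hreg]]
      rw [show List.filter (fun i : Nat => decide (L ≤ (i : Int) ∧ (i : Int) ≤ R)) (i :: is) = i :: List.filter (fun i : Nat => decide (L ≤ (i : Int) ∧ (i : Int) ≤ R)) is by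
            simp only [List.filter_cons]; rw [if_pos (by simpa using hreg)],
          show List.filter (fun i : Nat => !decide (L ≤ (i : Int) ∧ (i : Int) ≤ R)) (i :: is) = List.filter (fun i : Nat => !decide (L ≤ (i : Int) ∧ (i : Int) ≤ R)) is by
            simp only [List.filter_cons]; rw [if_neg (by simpa using hreg)]]
      simp only [List.map_cons]
      by_cases hbi : i = bi
      · rw [if_neg (by simp [hbi])]
        rw [show pvH2A h (bi : Int) (((i : Nat) : Int) :: ((is.filter (fun i : Nat => decide (L ≤ (i : Int) ∧ (i : Int) ≤ R))).map (fun i : Nat => (i : Int)))) a1 =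
            pvH2A h (bi : Int) ((is.filter (fun i : Nat => decide (L ≤ (i : Int) ∧ (i : Int) ≤ R))).map (fun i : Nat => (i : Int))) a1 by
          simp only [pvH2A]; rw [if_pos (by exact_mod_cast congrArg Nat.cast hbi)]]
        exact ih a1 a2
      · have hne : ¬ ((i : Nat) : Int) = (bi : Int) := by exact_mod_cast hbi
        rw [show pvH2A h (bi : Int) (((i : Nat) : Int) :: ((is.filter (fun i : Nat => decide (L ≤ (i : Int) ∧ (i : Int) ≤ R))).map (fun i : Nat => (i : Int)))) a1 =
            pvH2A h (bi : Int) ((is.filter (fun i : Nat => decide (L ≤ (i : Int) ∧ (i : Int) ≤ R))).map (fun i : Nat => (i : Int)))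
              (match a1 with | none => some (h.getD i 0) | some c => if h.getD i 0 < c then some (h.getD i 0) else some c) by
          simp only [pvH2A]; rw [if_neg hne, hval]]
        cases a1 with
        | none =>
          rw [if_pos ⟨hbi, by simp⟩]
          exact ih _ a2
        | some c =>
          by_cases hc : h.getD i 0 < c
          · rw [if_pos ⟨hbi, by simpa using hc⟩]
            simp only [hc, if_pos]
            exact ih _ a2
          · rw [if_neg (fun hcontra => hc (hcontra.2 c rfl))]
            simp only [hc, if_false]
            exact ih _ a2
    · rw [show pvScanB h L R bi (i :: is) (a1, a2) =
          pvScanB h L R bi is (a1, if a2 < h.getD i 0 then h.getD i 0 else a2) by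
        simp only [pvScanB]; rw [if_neg hreg]
        by_cases hx : a2 < h.getD i 0
        · rw [if_pos hx, if_pos hx]
        · rw [if_neg hx, if_neg hx]]
      rw [show List.filter (fun i : Nat => decide (L ≤ (i : Int) ∧ (i : Int) ≤ R)) (i :: is) = List.filter (fun i : Nat => decide (L ≤ (i : Int) ∧ (i : Int) ≤ R)) is by
            simp only [List.filter_cons]; rw [if_neg (by simp only [decide_eq_true_eq]; exact hreg)],
          show List.filter (fun i : Nat => !decide (L ≤ (i : Int) ∧ (i : Int) ≤ R)) (i :: is) = i :: List.filter (fun i : Nat => !decide (L ≤ (i : Int) ∧ (i : Int) ≤ R)) is by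
            simp only [List.filter_cons]; rw [if_pos (by simp only [Bool.not_eq_true', decide_eq_false_iff_not]; exact hreg)]]
      simp only [List.map_cons]
      rw [show pvHoutA h (((i : Nat) : Int) :: ((is.filter (fun i : Nat => !decide (L ≤ (i : Int) ∧ (i : Int) ≤ R))).map (fun i : Nat => (i : Int)))) a2 =
          pvHoutA h ((is.filter (fun i : Nat => !decide (L ≤ (i : Int) ∧ (i : Int) ≤ R))).map (fun i : Nat => (i : Int)))
            (if a2 < h.getD i 0 then h.getD i 0 else a2) by
        simp only [pvHoutA]; rw [hval]]
      exact ih a1 _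

theorem pvFiltRegion (L R : Int) (hL : 0 ≤ L) : ∀ n : Nat,
    ((List.range n).filter (fun i : Nat => decide (L ≤ (i : Int) ∧ (i : Int) ≤ R))).map (fun i : Nat => (i : Int)) =
      PySem.List.pyRange L (min (R + 1) (n : Int)) 1 := by
  intro n
  induction n with
  | zero =>
    rw [PySem.List.pyRange_one_eq_nil (by simp; omega)]
    simp
  | succ n ih =>
    rw [List.range_succ, List.filter_append, List.map_append, ih, Nat.cast_succ]
    by_cases h1 : L ≤ (n : Int) ∧ (n : Int) ≤ R
    · have hmin2 : min (R + 1) (n : Int) = (n : Int) := by omega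
      have hmin1 : min (R + 1) ((n : Int) + 1) = (n : Int) + 1 := by omega
      rw [hmin1, hmin2, PySem.List.pyRange_one_succ_right (by omega)]
      simp [h1]
    · by_cases h2 : R < (n : Int)
      · have hmin2 : min (R + 1) (n : Int) = R + 1 := by omega
        have hmin1 : min (R + 1) ((n : Int) + 1) = R + 1 := by omega
        rw [hmin1, hmin2]
        simp [h1]
      · have h3 : (n : Int) < L := by omega
        rw [PySem.List.pyRange_one_eq_nil (by omega), PySem.List.pyRange_one_eq_nil (by omega)]
        simp [h1]

theorem pvFiltOut (L R : Int) (hL : 0 ≤ L) (hLR : L ≤ R + 1) : ∀ n : Nat,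
    ((List.range n).filter (fun i : Nat => !decide (L ≤ (i : Int) ∧ (i : Int) ≤ R))).map (fun i : Nat => (i : Int)) =
      PySem.List.pyRange 0 (min L (n : Int)) 1 ++ PySem.List.pyRange (R + 1) (n : Int) 1 := by
  intro n
  induction n with
  | zero =>
    rw [PySem.List.pyRange_one_eq_nil (by omega), PySem.List.pyRange_one_eq_nil (by omega)]
    simp
  | succ n ih =>
    rw [List.range_succ, List.filter_append, List.map_append, ih, Nat.cast_succ]
    by_cases h1 : (n : Int) < L
    · have hmin1 : min L ((n : Int) + 1) = (n : Int) + 1 := by omega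
      have hmin2 : min L (n : Int) = (n : Int) := by omega
      have e1 : PySem.List.pyRange (R + 1) ((n : Int) + 1) 1 = [] := PySem.List.pyRange_one_eq_nil (by omega)
      have e2 : PySem.List.pyRange (R + 1) (n : Int) 1 = [] := PySem.List.pyRange_one_eq_nil (by omega)
      have e3 : PySem.List.pyRange 0 ((n : Int) + 1) 1 = PySem.List.pyRange 0 (n : Int) 1 ++ [(n : Int)] :=
        PySem.List.pyRange_one_succ_right (by omega)
      rw [hmin1, hmin2, e1, e2, e3]
      simp
      omega
    · by_cases h2 : (n : Int) ≤ R
      · have hmin : min L ((n : Int) + 1) = min L (n : Int) := by omega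
        rw [hmin]
        rw [PySem.List.pyRange_one_eq_nil (by omega : ((n : Int) + 1) ≤ R + 1),
            PySem.List.pyRange_one_eq_nil (by omega : (n : Int) ≤ R + 1)]
        have hp : (L ≤ (n : Int) ∧ (n : Int) ≤ R) := by omega
        simp [hp]
      · have hmin : min L ((n : Int) + 1) = min L (n : Int) := by omega
        rw [hmin, PySem.List.pyRange_one_succ_right (by omega : R + 1 ≤ (n : Int))]
        simp
        omega

-- ===== VERDICT (by name: the statement is the Claim_ definition above) =====
theorem max_rectangle_after_swap_spec : Claim_equal_max_rectangle_after_swap := by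
  intro heights _ hpre
  unfold Spec_max_rectangle_after_swap
  have hn0 : 0 < heights.length := List.length_pos_of_ne_nil hpre
  simp only [max_rectangle_after_swap, max_rectangle_after_swap_alt]
  rw [pvLeft_eq heights heights.length, pvRight_eq heights heights.length,
      pvBase_eq heights heights.length (List.range heights.length) (0, -1) (fun i hi => List.mem_range.mp hi)]
  obtain ⟨hok, hmono, hneg⟩ := pvBaseB_inv heights heights.length (List.range heights.length) (0, -1)
      (fun i hi => List.mem_range.mp hi) (Or.inl rfl)
  rcases hok with hcase | ⟨iN, hiN, hsnd, hfst, hposa⟩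
  · -- no bar of positive height: both sides are 0
    have hsnd2 : (pvBaseB heights heights.length (List.range heights.length) (0, -1)).2 = -1 := by rw [hcase]
    have hfst2 : (pvBaseB heights heights.length (List.range heights.length) (0, -1)).1 = 0 := by rw [hcase]
    obtain ⟨-, hall⟩ := hneg hsnd2
    have helem : ∀ v ∈ heights, v ≤ 0 := by
      intro v hv
      rcases List.mem_iff_getElem.mp hv with ⟨i, hi, rfl⟩
      have hai : pvArea heights heights.length i ≤ 0 := by simpa using hall i (List.mem_range.mpr hi)
      have hR := pvFindR_ge heights (heights.getD i 0) heights.length (i + 1) (by omega)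
      have hL := pvFindL_le heights (heights.getD i 0) i
      by_contra hposv
      have hgd : heights.getD i 0 = heights[i] := by
        rw [List.getD_eq_getElem?_getD, List.getElem?_eq_getElem hi]
        rfl
      unfold pvArea at hai
      rw [hgd] at hai
      have hw : 0 < pvFindR heights (heights.getD i 0) heights.length (i + 1) - pvFindL heights (heights.getD i 0) i - 1 := by
        push_cast at hR
        omega
      have hprod := mul_pos (show (0 : Int) < heights[i] by omega) hw
      rw [hgd] at hprod
      linarith
    have hlast1 : (PySem.List.pyGet? ((List.range heights.length).map (fun i => pvFindL heights (heights.getD i 0) i)) (-1)).getD 0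
        = pvFindL heights (heights.getD (heights.length - 1) 0) (heights.length - 1) := by
      rw [PySem.List.pyGet?_neg_one, List.getLast?_eq_getElem?]
      simp [List.getElem?_map, List.getElem?_range, Nat.sub_lt hn0 Nat.one_pos]
    have hlast2 : (PySem.List.pyGet? ((List.range heights.length).map (fun i => pvFindR heights (heights.getD i 0) heights.length (i + 1))) (-1)).getD 0
        = (heights.length : Int) := by
      rw [PySem.List.pyGet?_neg_one, List.getLast?_eq_getElem?]
      simp [List.getElem?_map, List.getElem?_range, Nat.sub_lt hn0 Nat.one_pos]
      rw [Nat.sub_add_cancel hn0, pvFindR, if_neg (lt_irrefl _)]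
    rw [hsnd2, hfst2, if_pos rfl, hlast1, hlast2,
        pvHoutA_nonpos heights helem, pvHoutA_nonpos heights helem]
    have hLb := pvFindL_le heights (heights.getD (heights.length - 1) 0) (heights.length - 1)
    have hwidth : 0 ≤ (heights.length : Int) - 1 - (pvFindL heights (heights.getD (heights.length - 1) 0) (heights.length - 1) + 1) + 1 := by
      have hc : ((heights.length - 1 : Nat) : Int) = (heights.length : Int) - 1 := by push_cast; omega
      rw [hc] at hLb
      omega
    by_cases himp : (PySem.List.pyGet? heights (-1)).getD 0 < 0
    · rw [if_pos himp]
      have hprod : min ((pvH2A heights (-1) (PySem.List.pyRange (pvFindL heights (heights.getD (heights.length - 1) 0) (heights.length - 1) + 1) ((heights.length : Int) - 1 + 1) 1) none).getD 0) 0 *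
          ((heights.length : Int) - 1 - (pvFindL heights (heights.getD (heights.length - 1) 0) (heights.length - 1) + 1) + 1) ≤ 0 := by
        have hmin := min_le_right ((pvH2A heights (-1) (PySem.List.pyRange (pvFindL heights (heights.getD (heights.length - 1) 0) (heights.length - 1) + 1) ((heights.length : Int) - 1 + 1) 1) none).getD 0) (0 : Int)
        nlinarith
      omega
    · rw [if_neg himp]
      simp
  · -- best bar iN: componentwise equal
    have hne : ¬ (pvBaseB heights heights.length (List.range heights.length) (0, -1)).2 = -1 := by
      rw [hsnd]; omega
    rw [if_neg hne, hsnd, Int.toNat_natCast]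
    have hgl : (PySem.List.pyGet? ((List.range heights.length).map (fun i => pvFindL heights (heights.getD i 0) i)) (iN : Int)).getD 0
        = pvFindL heights (heights.getD iN 0) iN := by
      rw [PySem.List.pyGet?_natCast]
      simp [List.getElem?_map, List.getElem?_range, hiN]
    have hgr : (PySem.List.pyGet? ((List.range heights.length).map (fun i => pvFindR heights (heights.getD i 0) heights.length (i + 1))) (iN : Int)).getD 0
        = pvFindR heights (heights.getD iN 0) heights.length (iN + 1) := by
      rw [PySem.List.pyGet?_natCast]
      simp [List.getElem?_map, List.getElem?_range, hiN]
    have hgh : (PySem.List.pyGet? heights (iN : Int)).getD 0 = heights.getD iN 0 := by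
      rw [PySem.List.pyGet?_natCast, List.getD_eq_getElem?_getD]
    rw [hgl, hgr, hgh]
    set x := heights.getD iN 0 with hx
    set FL := pvFindL heights x iN with hFL
    set FR := pvFindR heights x heights.length (iN + 1) with hFR
    have hL0 : 0 ≤ FL + 1 := by have := pvFindL_ge heights x iN; omega
    have hRn : FR ≤ (heights.length : Int) := pvFindR_le heights x heights.length (iN + 1)
    have hLle : FL + 1 ≤ (iN : Int) := by have := pvFindL_le heights x iN; omega
    have hRge : (iN : Int) ≤ FR - 1 := by
      have := pvFindR_ge heights x heights.length (iN + 1) (by omega)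
      push_cast at this
      omega
    rw [pvScan_split heights (FL + 1) (FR - 1) iN (List.range heights.length) none 0]
    rw [pvFiltRegion (FL + 1) (FR - 1) (by omega) heights.length,
        pvFiltOut (FL + 1) (FR - 1) (by omega) (by omega) heights.length]
    rw [show min (FR - 1 + 1) (heights.length : Int) = FR - 1 + 1 by omega,
        show min (FL + 1) (heights.length : Int) = FL + 1 by
          have : (iN : Int) < (heights.length : Int) := by exact_mod_cast hiN
          omega]
    rw [pvHoutA_append]
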